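-- pv_equiv track=rewrite | github.com/pavelchowdhury99/NeetTyper | app.py | _spaces_to_tabs
-- ===== SOURCE A (Python) =====
-- def _spaces_to_tabs(code: str, spaces_per_indent: int = 4) -> str:
--     """Convert leading spaces to tabs."""
--     lines = code.split("\n")
--     result = []
--     for line in lines:
--         # Count leading spaces
--         stripped = line.lstrip(" ")
--         num_spaces = len(line) - len(stripped)
--
--         # Convert groups of spaces_per_indent to tabs
--         num_tabs = num_spaces // spaces_per_indent
--         remainder = num_spaces % spaces_per_indent
--
--         # Build the new line
--         new_line = "\t" * num_tabs + " " * remainder + stripped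
--         result.append(new_line)
--
--     return "\n".join(result)
-- ===== SOURCE B (Python) =====
-- def _spaces_to_tabs(code: str, spaces_per_indent: int = 4) -> str:
--     """Convert leading spaces to tabs, in one left-to-right scan (no split/join)."""
--     out = []
--     pending = 0  # count of leading spaces seen at a line start; None mid-line
--     for c in code:
--         if pending is not None:
--             if c == " ":
--                 pending += 1
--                 continue
--             if pending:
--                 tabs, rem = divmod(pending, spaces_per_indent)
--                 out.append("\t" * tabs + " " * rem)
--         out.append(c)
--         pending = 0 if c == "\n" else None
--     if pending:
--         tabs, rem = divmod(pending, spaces_per_indent)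
--         out.append("\t" * tabs + " " * rem)
--     return "".join(out)
-- ===== Notes on version B (the rewrite author's own statement) =====
-- stated objective: alternative
-- what changed: A splits the code on newlines, lstrips each line and rejoins; B makes a single left-to-right scan over the characters with a pending-leading-spaces counter, emitting tabs at each line start, with no split/lstrip/join passes.
import Mathlib
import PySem

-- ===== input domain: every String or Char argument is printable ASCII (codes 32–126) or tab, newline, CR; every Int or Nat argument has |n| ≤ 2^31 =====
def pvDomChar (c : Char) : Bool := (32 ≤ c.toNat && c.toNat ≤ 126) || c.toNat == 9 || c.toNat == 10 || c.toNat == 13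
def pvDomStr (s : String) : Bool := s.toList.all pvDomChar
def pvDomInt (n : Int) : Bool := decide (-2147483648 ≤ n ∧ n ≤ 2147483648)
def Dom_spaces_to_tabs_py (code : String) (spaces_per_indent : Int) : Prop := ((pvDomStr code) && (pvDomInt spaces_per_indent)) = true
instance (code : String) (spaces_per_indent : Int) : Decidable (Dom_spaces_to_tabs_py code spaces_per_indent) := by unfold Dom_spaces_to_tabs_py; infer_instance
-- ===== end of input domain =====

-- B replaces A's split/lstrip/join per-line pipeline by one left-to-right scan of the
-- characters with a pending-spaces counter; same results, a different traversal (objective: alternative).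

-- ===== PORT A =====
-- line.lstrip(" ") strips exactly the character ' ': ported as dropWhile (· == ' ') (exact)
def spaces_to_tabs_py (code : String) (spaces_per_indent : Int) : String :=
  let lines := PySem.Chars.splitOn code.toList ['\n']
  let result := lines.foldl (fun result line =>
    let stripped := line.dropWhile (· == ' ')
    let num_spaces : Int := (line.length : Int) - (stripped.length : Int)
    let num_tabs := PySem.Int.floordiv num_spaces spaces_per_indent
    let remainder := PySem.Int.mod num_spaces spaces_per_indent
    let new_line := PySem.List.pyRepeat ['\t'] num_tabs ++ PySem.List.pyRepeat [' '] remainder ++ stripped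
    result ++ [new_line]) []
  String.ofList (PySem.Chars.join ['\n'] result)

-- ===== PORT B =====
-- Source B's 'if pending: append tabs+remainder' block
def pvRepl (spi : Int) (n : Nat) : List Char :=
  if n = 0 then [] else
    PySem.List.pyRepeat ['\t'] (PySem.Int.floordiv (n : Int) spi) ++
    PySem.List.pyRepeat [' '] (PySem.Int.mod (n : Int) spi)

-- Source B's single for-loop: state 'some n' = at a line start with n leading spaces counted,
-- 'none' = mid-line; the [] cases are the flush after the loop
def pvScan (spi : Int) : Option Nat → List Char → List Char
  | some n, [] => pvRepl spi n
  | none, [] => []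
  | some n, c :: cs =>
      if c = ' ' then pvScan spi (some (n + 1)) cs
      else pvRepl spi n ++ c :: pvScan spi (if c = '\n' then some 0 else none) cs
  | none, c :: cs => c :: pvScan spi (if c = '\n' then some 0 else none) cs

def spaces_to_tabs_py_alt (code : String) (spaces_per_indent : Int) : String :=
  String.ofList (pvScan spaces_per_indent (some 0) code.toList)

-- ===== PRECONDITION & SPEC =====
-- A divides by spaces_per_indent on every line, so it raises ZeroDivisionError whenever
-- spaces_per_indent = 0 (on ANY code); exactly those inputs are excluded.
def Pre_spaces_to_tabs_py (code : String) (spaces_per_indent : Int) : Prop :=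
  spaces_per_indent ≠ 0
instance (code : String) (spaces_per_indent : Int) : Decidable (Pre_spaces_to_tabs_py code spaces_per_indent) := by unfold Pre_spaces_to_tabs_py; infer_instance
def pvWitness_spaces_to_tabs_py : String × Int := ("    if x:\n      y\n", 4)

def Spec_spaces_to_tabs_py (code : String) (spaces_per_indent : Int) (out : String) : Prop := out = spaces_to_tabs_py_alt code spaces_per_indent
instance (code : String) (spaces_per_indent : Int) (out : String) : Decidable (Spec_spaces_to_tabs_py code spaces_per_indent out) := by unfold Spec_spaces_to_tabs_py; infer_instance

-- ===== CLAIM (what is proved, stated in full; the proofs are below) =====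
def Claim_equal_spaces_to_tabs_py : Prop := ∀ (code : String) (spaces_per_indent : Int), Dom_spaces_to_tabs_py code spaces_per_indent → Pre_spaces_to_tabs_py code spaces_per_indent → Spec_spaces_to_tabs_py code spaces_per_indent (spaces_to_tabs_py code spaces_per_indent)

-- ===== LEMMAS AND PROOFS =====

-- reference splitter: the list of '\n'-separated segments of cs
def pvLines : List Char → List (List Char)
  | [] => [[]]
  | c :: cs => match pvLines cs with
    | [] => []
    | l :: ls => if c = '\n' then [] :: l :: ls else (c :: l) :: ls

-- A's per-line transformation, as a named function
def pvG (spi : Int) (line : List Char) : List Char :=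
  let stripped := line.dropWhile (· == ' ')
  let num_spaces : Int := (line.length : Int) - (stripped.length : Int)
  PySem.List.pyRepeat ['\t'] (PySem.Int.floordiv num_spaces spi) ++
    PySem.List.pyRepeat [' '] (PySem.Int.mod num_spaces spi) ++ stripped

def pvMapTail (spi : Int) : List (List Char) → List (List Char)
  | [] => []
  | l :: ls => l :: ls.map (pvG spi)

lemma pvLines_shape (cs : List Char) : ∃ l ls, pvLines cs = l :: ls := by
  induction cs with
  | nil => exact ⟨[], [], rfl⟩
  | cons c cs ih =>
    obtain ⟨l, ls, h⟩ := ih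
    by_cases hc : c = '\n' <;> simp [pvLines, h, hc]

lemma pvGo_cons (f : Nat) (c : Char) (cs cur : List Char) (acc : List (List Char)) :
    PySem.Chars.splitOn.go ['\n'] (f+1) (c :: cs) cur acc =
      if c = '\n' then PySem.Chars.splitOn.go ['\n'] f cs [] (cur.reverse :: acc)
      else PySem.Chars.splitOn.go ['\n'] f cs (c :: cur) acc := by
  by_cases hc : c = '\n' <;>
    simp [PySem.Chars.splitOn.go, List.isPrefixOf, hc] <;>
    exact fun h => absurd h.symm hc

lemma pvGo_eq (cs : List Char) : ∀ (fuel : Nat), cs.length ≤ fuel →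
    ∀ (cur : List Char) (acc : List (List Char)),
    PySem.Chars.splitOn.go ['\n'] fuel cs cur acc =
      acc.reverse ++ (match pvLines cs with | [] => [] | l :: ls => (cur.reverse ++ l) :: ls) := by
  induction cs with
  | nil =>
    intro fuel _ cur acc
    cases fuel <;> simp [PySem.Chars.splitOn.go, pvLines]
  | cons c cs ih =>
    intro fuel hf cur acc
    cases fuel with
    | zero => simp at hf
    | succ f =>
      obtain ⟨l, ls, hls⟩ := pvLines_shape cs
      rw [pvGo_cons]
      by_cases hc : c = '\n'
      · rw [if_pos hc, ih f (by simpa using hf)]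
        simp [pvLines, hls, hc]
      · rw [if_neg hc, ih f (by simpa using hf)]
        simp [pvLines, hls, hc]

lemma pvSplitOn_eq (cs : List Char) : PySem.Chars.splitOn cs ['\n'] = pvLines cs := by
  obtain ⟨l, ls, hls⟩ := pvLines_shape cs
  rw [PySem.Chars.splitOn, pvGo_eq cs (cs.length + 1) (by omega) [] []]
  simp [hls]

lemma pvFoldl_map (spi : Int) (l : List (List Char)) :
    ∀ acc : List (List Char),
    l.foldl (fun result line =>
      result ++ [PySem.List.pyRepeat ['\t'] (PySem.Int.floordiv ((line.length : Int) - ((line.dropWhile (· == ' ')).length : Int)) spi) ++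
                 PySem.List.pyRepeat [' '] (PySem.Int.mod ((line.length : Int) - ((line.dropWhile (· == ' ')).length : Int)) spi) ++
                 line.dropWhile (· == ' ')]) acc = acc ++ l.map (pvG spi) := by
  induction l with
  | nil => intro acc; simp
  | cons x xs ih =>
    intro acc
    rw [List.foldl_cons, ih]
    simp [pvG, List.append_assoc]

lemma pvA_eq (code : String) (spi : Int) :
    spaces_to_tabs_py code spi =
      String.ofList (PySem.Chars.join ['\n'] ((pvLines code.toList).map (pvG spi))) := by
  unfold spaces_to_tabs_py
  rw [pvSplitOn_eq]
  show String.ofList (PySem.Chars.join ['\n'] (List.foldl (fun result line =>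
      result ++ [PySem.List.pyRepeat ['\t'] (PySem.Int.floordiv ((line.length : Int) - ((line.dropWhile (· == ' ')).length : Int)) spi) ++
                 PySem.List.pyRepeat [' '] (PySem.Int.mod ((line.length : Int) - ((line.dropWhile (· == ' ')).length : Int)) spi) ++
                 line.dropWhile (· == ' ')]) [] (pvLines code.toList))) = _
  rw [pvFoldl_map]
  simp

lemma pvJoin_cons_append (sep a l : List Char) (M : List (List Char)) :
    PySem.Chars.join sep ((a ++ l) :: M) = a ++ PySem.Chars.join sep (l :: M) := by
  cases M with
  | nil => simp [PySem.Chars.join_singleton]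
  | cons q M => simp [PySem.Chars.join_cons_cons, List.append_assoc]

lemma pvRepl_eq (spi : Int) (hspi : spi ≠ 0) (n : Nat) :
    pvRepl spi n = PySem.List.pyRepeat ['\t'] (PySem.Int.floordiv (n : Int) spi) ++
                   PySem.List.pyRepeat [' '] (PySem.Int.mod (n : Int) spi) := by
  unfold pvRepl
  split
  · rename_i h
    subst h
    have hm : PySem.Int.mod (0 : Int) spi = 0 := by
      have := (PySem.Int.mod_eq_zero_iff_dvd 0 spi).mpr (dvd_zero spi)
      simpa using this
    have hd : PySem.Int.floordiv (0 : Int) spi = 0 := by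
      have h1 := PySem.Int.floordiv_mul_add_mod 0 spi
      rw [hm] at h1
      have := mul_eq_zero.mp (by linarith : PySem.Int.floordiv 0 spi * spi = 0)
      tauto
    simp [hm, hd, PySem.List.pyRepeat]
  · rfl

lemma pvG_line (spi : Int) (hspi : spi ≠ 0) (n : Nat) (l : List Char)
    (hl : l.dropWhile (· == ' ') = l) :
    pvG spi (List.replicate n ' ' ++ l) = pvRepl spi n ++ l := by
  have hdw : (List.replicate n ' ' ++ l).dropWhile (· == ' ') = l := by
    rw [List.dropWhile_append]
    simp [hl]
  unfold pvG
  simp only [hdw, List.length_append, List.length_replicate]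
  rw [pvRepl_eq spi hspi n]
  have : ((n + l.length : Nat) : Int) - (l.length : Int) = (n : Int) := by push_cast; ring
  rw [this, List.append_assoc]

lemma pvLines_replicate (n : Nat) (rest : List Char) :
    pvLines (List.replicate n ' ' ++ rest) =
      match pvLines rest with | [] => [] | l :: ls => (List.replicate n ' ' ++ l) :: ls := by
  induction n with
  | zero => obtain ⟨l, ls, h⟩ := pvLines_shape rest; simp [h]
  | succ m ih =>
    obtain ⟨l, ls, h⟩ := pvLines_shape rest
    have : List.replicate (m+1) ' ' ++ rest = ' ' :: (List.replicate m ' ' ++ rest) := by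
      simp [List.replicate_succ]
    rw [this]
    simp only [pvLines, ih, h]
    simp [List.replicate_succ]

lemma pvScan_eq (spi : Int) (hspi : spi ≠ 0) (cs : List Char) :
    (pvScan spi none cs = PySem.Chars.join ['\n'] (pvMapTail spi (pvLines cs))) ∧
    (∀ n : Nat, pvScan spi (some n) cs =
      PySem.Chars.join ['\n'] ((pvLines (List.replicate n ' ' ++ cs)).map (pvG spi))) := by
  induction cs with
  | nil =>
    constructor
    · simp [pvScan, pvLines, pvMapTail, PySem.Chars.join_singleton]
    · intro n
      have h0 : pvLines (List.replicate n ' ' ++ ([] : List Char)) = [List.replicate n ' ' ++ []] := by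
        simpa [pvLines] using pvLines_replicate n []
      have hg : pvG spi (List.replicate n ' ' ++ ([] : List Char)) = pvRepl spi n := by
        simpa using pvG_line spi hspi n [] (by simp)
      rw [h0, List.map_cons, List.map_nil, PySem.Chars.join_singleton, hg]
      simp [pvScan]
  | cons c cs ih =>
    obtain ⟨l, ls, hls⟩ := pvLines_shape cs
    constructor
    · by_cases hc : c = '\n'
      · subst hc
        show ('\n' :: pvScan spi (if ('\n' : Char) = '\n' then some 0 else none) cs) = _
        rw [if_pos rfl, ih.2 0]
        have hpl : pvLines ('\n' :: cs) = [] :: l :: ls := by simp [pvLines, hls]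
        rw [hpl]
        show _ = PySem.Chars.join ['\n'] ([] :: (pvG spi l :: ls.map (pvG spi)))
        rw [PySem.Chars.join_cons_cons]
        simp [hls]
      · show (c :: pvScan spi (if c = '\n' then some 0 else none) cs) = _
        rw [if_neg hc, ih.1]
        simp only [pvLines, hls, if_neg hc, pvMapTail, List.map_cons]
        have := pvJoin_cons_append ['\n'] [c] l ((ls.map (pvG spi)))
        simpa using this.symm
    · intro n
      by_cases hsp : c = ' '
      · subst hsp
        show pvScan spi (some (n + 1)) cs = _
        rw [ih.2 (n + 1)]
        have : List.replicate n ' ' ++ ' ' :: cs = List.replicate (n + 1) ' ' ++ cs := by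
          rw [List.replicate_succ']
          simp
        rw [this]
      · have hstep : pvScan spi (some n) (c :: cs) =
            pvRepl spi n ++ c :: pvScan spi (if c = '\n' then some 0 else none) cs := by
          simp only [pvScan]
          rw [if_neg hsp]
        rw [hstep]
        by_cases hc : c = '\n'
        · subst hc
          rw [if_pos rfl, ih.2 0]
          rw [pvLines_replicate n ('\n' :: cs)]
          have hpl : pvLines ('\n' :: cs) = [] :: l :: ls := by simp [pvLines, hls]
          rw [hpl]
          show _ = PySem.Chars.join ['\n']
            (pvG spi (List.replicate n ' ' ++ []) :: pvG spi l :: ls.map (pvG spi))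
          rw [PySem.Chars.join_cons_cons]
          have hg : pvG spi (List.replicate n ' ') = pvRepl spi n := by
            simpa using pvG_line spi hspi n [] (by simp)
          simp [hls, hg]
        · rw [if_neg hc, ih.1]
          rw [pvLines_replicate n (c :: cs)]
          simp only [pvLines, hls, if_neg hc, List.map_cons, pvMapTail]
          have hdw : (c :: l).dropWhile (· == ' ') = c :: l := by
            simp [List.dropWhile_cons, hsp]
          rw [pvG_line spi hspi n (c :: l) hdw]
          rw [pvJoin_cons_append ['\n'] (pvRepl spi n) (c :: l) (ls.map (pvG spi))]
          have := pvJoin_cons_append ['\n'] [c] l ((ls.map (pvG spi)))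
          simp only [List.cons_append, List.nil_append] at this
          rw [this]

theorem spaces_to_tabs_py_spec : Claim_equal_spaces_to_tabs_py := by
  intro code spi _ hpre
  unfold Spec_spaces_to_tabs_py spaces_to_tabs_py_alt
  rw [pvA_eq, (pvScan_eq spi hpre code.toList).2 0]
  simp
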